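-- pv_equiv track=rewrite | github.com/daniel-reich/turbo-robot | kGEHEnj7qQf3KHd6F_23.py | alphanumeric_restriction
-- ===== SOURCE A (Python) =====
-- def alphanumeric_restriction(s):
--   isalpha = False
--   isnum = False
--   if len(s) == 0:
--     return False
--   for i in s:
--     if i.isalpha() == True:
--       isalpha = True
--     elif i.isnumeric() == True:
--       isnum = True
--     else:
--       return False
--     if isalpha == True and isnum == True:
--       return False
--
--   return True
-- ===== SOURCE B (Python) =====
-- def alphanumeric_restriction(s):
--     if not s:
--         return False
--     def cls(c):
--         if c.isalpha():
--             return 0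
--         if c.isnumeric():
--             return 1
--         return -1
--     ref = cls(s[0])
--     return ref != -1 and all(cls(c) == ref for c in s)
-- ===== Notes on version B (the rewrite author's own statement) =====
-- stated objective: alternative
-- what changed: Replaces A's two accumulating boolean flags with both-seen early exit by a per-character class function anchored on the first character's class, then a single uniformity check with all().
import Mathlib
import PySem

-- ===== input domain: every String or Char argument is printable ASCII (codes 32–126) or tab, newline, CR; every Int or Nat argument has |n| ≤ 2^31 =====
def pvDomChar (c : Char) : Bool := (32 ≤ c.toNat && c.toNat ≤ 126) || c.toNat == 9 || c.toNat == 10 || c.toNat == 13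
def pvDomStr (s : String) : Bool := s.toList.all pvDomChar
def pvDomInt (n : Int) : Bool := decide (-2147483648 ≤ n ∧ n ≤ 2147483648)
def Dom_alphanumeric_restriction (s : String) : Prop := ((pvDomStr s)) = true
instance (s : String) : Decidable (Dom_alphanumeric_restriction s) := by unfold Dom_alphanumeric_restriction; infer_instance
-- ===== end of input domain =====

-- ===== PORT A =====
-- B anchors on the first character's class and checks uniformity; same cost, different decomposition.
-- Ports are exact on the printable-ASCII domain, where str.isnumeric coincides with PySem.Chars.isdigit.
def alphaLoop : List Char → Bool → Bool → Bool
  | [], _, _ => true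
  | i :: rest, isalpha, isnum =>
    if PySem.Chars.isalpha i then
      if true && isnum then false else alphaLoop rest true isnum
    else if PySem.Chars.isdigit i then
      if isalpha && true then false else alphaLoop rest isalpha true
    else false

def alphanumeric_restriction (s : String) : Bool :=
  if PySem.Str.len s == 0 then false else alphaLoop s.toList false false

-- ===== PORT B =====
def pvCls (c : Char) : Int :=
  if PySem.Chars.isalpha c then 0 else if PySem.Chars.isdigit c then 1 else -1

def alphanumeric_restriction_alt (s : String) : Bool :=
  match s.toList with
  | [] => false
  | c :: _ =>
    let r := pvCls c
    r != -1 && s.toList.all (fun d => pvCls d == r)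

-- ===== PRECONDITION & SPEC =====
def Spec_alphanumeric_restriction (s : String) (out : Bool) : Prop := out = alphanumeric_restriction_alt s
instance (s : String) (out : Bool) : Decidable (Spec_alphanumeric_restriction s out) := by unfold Spec_alphanumeric_restriction; infer_instance

-- ===== CLAIM (what is proved, stated in full; the proofs are below) =====
def Claim_equal_alphanumeric_restriction : Prop := ∀ (s : String), Dom_alphanumeric_restriction s → Spec_alphanumeric_restriction s (alphanumeric_restriction s)

-- ===== LEMMAS AND PROOFS =====
theorem cls_zero (c : Char) : (pvCls c == 0) = PySem.Chars.isalpha c := by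
  unfold pvCls; split_ifs <;> simp [*]

theorem cls_one (c : Char) : (pvCls c == 1) = (!PySem.Chars.isalpha c && PySem.Chars.isdigit c) := by
  unfold pvCls; split_ifs <;> simp [*]

theorem loop_alpha (l : List Char) : alphaLoop l true false = l.all PySem.Chars.isalpha := by
  induction l with
  | nil => rfl
  | cons c rest ih =>
    by_cases h1 : PySem.Chars.isalpha c
    · simp [alphaLoop, h1, ih]
    · by_cases h2 : PySem.Chars.isdigit c <;> simp [alphaLoop, h1, h2]

theorem loop_num (l : List Char) :
    alphaLoop l false true = l.all (fun c => !PySem.Chars.isalpha c && PySem.Chars.isdigit c) := by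
  induction l with
  | nil => rfl
  | cons c rest ih =>
    by_cases h1 : PySem.Chars.isalpha c
    · simp [alphaLoop, h1]
    · by_cases h2 : PySem.Chars.isdigit c <;> simp [alphaLoop, h1, h2, ih]

-- ===== VERDICT (by name: the statement is the Claim_ definition above) =====
theorem alphanumeric_restriction_spec : Claim_equal_alphanumeric_restriction := by
  intro s _
  unfold Spec_alphanumeric_restriction alphanumeric_restriction alphanumeric_restriction_alt
  rcases h : s.toList with _ | ⟨c, rest⟩
  · simp [PySem.Str.len, h]
  · have hlen : (PySem.Str.len s == 0) = false := by
      simp [PySem.Str.len, h]; omega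
    have e0 : (fun d => pvCls d == 0) = PySem.Chars.isalpha := funext cls_zero
    have e1 : (fun d => pvCls d == 1) = fun c => !PySem.Chars.isalpha c && PySem.Chars.isdigit c :=
      funext cls_one
    simp only [hlen, Bool.false_eq_true, if_false]
    show alphaLoop (c :: rest) false false =
      (pvCls c != -1 && (c :: rest).all fun d => pvCls d == pvCls c)
    by_cases h1 : PySem.Chars.isalpha c
    · have hc : pvCls c = 0 := by simp [pvCls, h1]
      simp [alphaLoop, h1, loop_alpha, hc, e0]
    · by_cases h2 : PySem.Chars.isdigit c
      · have hc : pvCls c = 1 := by simp [pvCls, h1, h2]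
        simp [alphaLoop, h1, h2, loop_num, hc, e1]
      · have hc : pvCls c = -1 := by simp [pvCls, h1, h2]
        simp [alphaLoop, h1, h2, hc]
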